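-- pv_equiv track=rewrite | github.com/sfwu/Course-work | cs412/Assignments/as_1/hw1.py | give_closed
-- ===== SOURCE A (Python) =====
-- def give_closed(list_list):
--     if len(list_list) == 1:
--         return(list_list)
--     final = []
--     for item in list_list:
--         same_sup_list = []
--         for other in list_list:
--             if set(item[0]) != set(other[0]):
--                 if item[1] == other[1]:
--                     same_sup_list.append(other)
--         if same_sup_list == []:
--             final.append(item)
--         else:
--             for other in same_sup_list:
--                 indicator = 1
--                 for word in item[0]:
--                     if word in other[0]:
--                         continue
--                     else:
--                         indicator = 0
--                         break
--                 if indicator == 1: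
--                     break
--             if indicator == 0:
--                 final.append(item)
--     return(final)
-- ===== SOURCE B (Python) =====
-- def give_closed(list_list):
--     if len(list_list) == 1:
--         return list_list
--     groups = {}
--     for item in list_list:
--         groups.setdefault(item[1], []).append(set(item[0]))
--     final = []
--     for item in list_list:
--         s = set(item[0])
--         if not any(s != g and s <= g for g in groups[item[1]]):
--             final.append(item)
--     return final
-- ===== Notes on version B (the rewrite author's own statement) =====
-- stated objective: alternative
-- what changed: B builds a dict grouping the word-sets by support value in one pass and then keeps an item unless its equal-support group contains a different superset, replacing A's per-item rescan of the whole list with its hand-rolled indicator/break loops by a group lookup and a subset test.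
import Mathlib
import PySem

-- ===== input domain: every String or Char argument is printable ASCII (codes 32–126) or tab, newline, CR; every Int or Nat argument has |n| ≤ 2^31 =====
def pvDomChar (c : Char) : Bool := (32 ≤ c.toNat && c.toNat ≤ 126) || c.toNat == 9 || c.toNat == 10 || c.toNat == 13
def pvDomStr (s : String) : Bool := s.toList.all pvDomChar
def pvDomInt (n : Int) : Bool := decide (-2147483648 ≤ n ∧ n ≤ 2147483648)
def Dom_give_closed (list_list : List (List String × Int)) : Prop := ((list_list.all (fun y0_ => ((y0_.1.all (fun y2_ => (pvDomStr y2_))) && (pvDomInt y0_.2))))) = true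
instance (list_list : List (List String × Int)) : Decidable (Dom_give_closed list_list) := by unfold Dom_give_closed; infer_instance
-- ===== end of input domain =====

-- B replaces A's per-item rescan of the whole list by a support-indexed dict of word-sets built once (alternative decomposition).

-- ===== PORT A =====
-- inner 'for word in item[0]' loop of A: the final value of 'indicator'
def giveClosedWordsLoop (words : List String) (other : List String) : Int :=
  match words with
  | [] => 1
  | w :: ws => if other.contains w then giveClosedWordsLoop ws other else 0

-- middle 'for other in same_sup_list' loop of A: the value 'indicator' holds after the loop (with its breaks)
def giveClosedOthersLoop (item1 : List String) (others : List (List String × Int)) : Int :=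
  match others with
  | [] => 0
  | o :: rest =>
    let indicator := giveClosedWordsLoop item1 o.1
    if indicator = 1 then 1 else giveClosedOthersLoop item1 rest

def give_closed (list_list : List (List String × Int)) : List (List String × Int) :=
  if PySem.List.len list_list = 1 then list_list
  else
    list_list.foldl (fun final item =>
      let same_sup_list := list_list.foldl (fun acc other =>
        if !PySem.Set.equal (PySem.Set.ofList item.1) (PySem.Set.ofList other.1) then
          if item.2 == other.2 then acc ++ [other] else acc
        else acc) []
      if same_sup_list = [] then final ++ [item]
      else if giveClosedOthersLoop item.1 same_sup_list = 0 then final ++ [item]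
      else final) []

-- ===== PORT B =====
def give_closed_alt (list_list : List (List String × Int)) : List (List String × Int) :=
  if PySem.List.len list_list = 1 then list_list
  else
    let groups : PySem.Dict Int (List (PySem.Set String)) :=
      list_list.foldl (fun d item =>
        d.modify item.2 [] (fun l => l ++ [PySem.Set.ofList item.1])) PySem.Dict.empty
    list_list.foldl (fun final item =>
      let s := PySem.Set.ofList item.1
      if !((groups.getD item.2 []).any (fun g =>
            !PySem.Set.equal s g && PySem.Set.issubset s g)) then final ++ [item]
      else final) []

-- ===== PRECONDITION & SPEC =====
def Spec_give_closed (list_list : List (List String × Int)) (out : List (List String × Int)) : Prop := out = give_closed_alt list_list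
instance (list_list : List (List String × Int)) (out : List (List String × Int)) : Decidable (Spec_give_closed list_list out) := by unfold Spec_give_closed; infer_instance

-- ===== CLAIM (what is proved, stated in full; the proofs are below) =====
def Claim_equal_give_closed : Prop := ∀ (list_list : List (List String × Int)), Dom_give_closed list_list → Spec_give_closed list_list (give_closed list_list)

-- ===== LEMMAS AND PROOFS =====

lemma wordsLoop_eq (ws other : List String) :
    giveClosedWordsLoop ws other = if ws.all other.contains then 1 else 0 := by
  induction ws with
  | nil => simp [giveClosedWordsLoop]
  | cons w rest ih =>
    cases h : other.contains w <;>
      simp only [giveClosedWordsLoop, List.all_cons, ih, h] <;> simp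

lemma othersLoop_eq (s : List String) (others : List (List String × Int)) :
    giveClosedOthersLoop s others =
      if others.any (fun o => s.all o.1.contains) then 1 else 0 := by
  induction others with
  | nil => simp [giveClosedOthersLoop]
  | cons o rest ih =>
    by_cases h : s.all o.1.contains = true
    · simp [giveClosedOthersLoop, wordsLoop_eq, h]
    · rw [Bool.not_eq_true] at h
      simp [giveClosedOthersLoop, wordsLoop_eq, ih, h]
      simp only [h, Bool.false_or]

lemma issubset_eq_all (ws o1 : List String) :
    PySem.Set.issubset (PySem.Set.ofList ws) (PySem.Set.ofList o1) = ws.all o1.contains := by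
  rw [Bool.eq_iff_iff, PySem.Set.issubset_iff]
  simp [PySem.Set.mem_ofList, List.all_eq_true]

-- B's dict of groups, looked up at a support value, is the word-sets of the items with that support
lemma groups_getD (ll : List (List String × Int)) (item : List String × Int) :
    (ll.foldl (fun d it =>
        d.modify it.2 [] (fun l => l ++ [PySem.Set.ofList it.1])) PySem.Dict.empty).getD item.2 []
      = ((ll.map (fun it => (it.2, PySem.Set.ofList it.1))).filter
          (fun p => p.1 == item.2)).map (fun p => p.2) := by
  have h := PySem.Dict.getD_foldl_modify_append
    (ll.map (fun it => (it.2, PySem.Set.ofList it.1))) PySem.Dict.empty item.2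
  rw [List.foldl_map] at h
  simpa using h

-- the two per-item conditions name the same witnesses
lemma pred_eq (item o : List String × Int) :
    ((!PySem.Set.equal (PySem.Set.ofList item.1) (PySem.Set.ofList o.1)
        && (item.2 == o.2)) && item.1.all o.1.contains)
    = ((o.2 == item.2) && (!PySem.Set.equal (PySem.Set.ofList item.1) (PySem.Set.ofList o.1)
        && PySem.Set.issubset (PySem.Set.ofList item.1) (PySem.Set.ofList o.1))) := by
  rw [issubset_eq_all, Bool.eq_iff_iff]
  simp only [Bool.and_eq_true, beq_iff_eq]
  constructor
  · rintro ⟨⟨h1, h2⟩, h3⟩; exact ⟨h2.symm, h1, h3⟩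
  · rintro ⟨h2, h1, h3⟩; exact ⟨⟨h1, h2.symm⟩, h3⟩

-- one step of A's output loop equals one step of B's output loop
lemma step_eq (ll final : List (List String × Int)) (item : List String × Int) :
    (let same_sup_list := ll.foldl (fun acc other =>
        if !PySem.Set.equal (PySem.Set.ofList item.1) (PySem.Set.ofList other.1) then
          if item.2 == other.2 then acc ++ [other] else acc
        else acc) []
      if same_sup_list = [] then final ++ [item]
      else if giveClosedOthersLoop item.1 same_sup_list = 0 then final ++ [item]
      else final)
    = (if !(((ll.foldl (fun d it =>
          d.modify it.2 [] (fun l => l ++ [PySem.Set.ofList it.1]))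
          PySem.Dict.empty).getD item.2 []).any (fun g =>
        !PySem.Set.equal (PySem.Set.ofList item.1) g &&
          PySem.Set.issubset (PySem.Set.ofList item.1) g)) then final ++ [item]
      else final) := by
  have hinner : (fun (acc : List (List String × Int)) other =>
      if !PySem.Set.equal (PySem.Set.ofList item.1) (PySem.Set.ofList other.1) then
        if item.2 == other.2 then acc ++ [other] else acc
      else acc)
    = fun acc other =>
      if (!PySem.Set.equal (PySem.Set.ofList item.1) (PySem.Set.ofList other.1)
          && (item.2 == other.2)) then acc ++ [other] else acc := by
    funext acc other
    cases h1 : PySem.Set.equal (PySem.Set.ofList item.1) (PySem.Set.ofList other.1) <;>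
      cases h2 : item.2 == other.2 <;> simp_all
  simp only [hinner, groups_getD ll item]
  rw [PySem.List.foldl_append_if _ (fun o => o), List.nil_append, List.map_id']
  rw [othersLoop_eq, List.any_filter]
  have hany : ((((ll.map (fun it => ((it.2 : Int), PySem.Set.ofList it.1))).filter
        (fun p => p.1 == item.2)).map (fun p => p.2)).any (fun g =>
          !PySem.Set.equal (PySem.Set.ofList item.1) g &&
            PySem.Set.issubset (PySem.Set.ofList item.1) g))
      = ll.any (fun o =>
          (!PySem.Set.equal (PySem.Set.ofList item.1) (PySem.Set.ofList o.1)
            && (item.2 == o.2)) && item.1.all o.1.contains) := by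
    rw [List.any_map, List.any_filter, List.any_map]
    apply PySem.List.any_congr_mem
    intro o _
    simp only [Function.comp]
    exact (pred_eq item o).symm
  rw [hany]
  by_cases hE : (ll.filter (fun other =>
      !PySem.Set.equal (PySem.Set.ofList item.1) (PySem.Set.ofList other.1)
        && (item.2 == other.2))) = []
  · have hL : ll.any (fun o =>
        (!PySem.Set.equal (PySem.Set.ofList item.1) (PySem.Set.ofList o.1)
          && (item.2 == o.2)) && item.1.all o.1.contains) = false := by
      rw [← List.any_filter, hE]
      rfl
    simp [hE, hL]
  · cases hL : ll.any (fun o =>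
        (!PySem.Set.equal (PySem.Set.ofList item.1) (PySem.Set.ofList o.1)
          && (item.2 == o.2)) && item.1.all o.1.contains) <;> simp_all

theorem give_closed_spec_aux (ll : List (List String × Int)) :
    give_closed ll = give_closed_alt ll := by
  unfold give_closed give_closed_alt
  by_cases h : PySem.List.len ll = 1
  · rw [if_pos h]; rw [if_pos h]
  · rw [if_neg h]; rw [if_neg h]
    apply PySem.List.foldl_congr_mem
    intro final item _
    exact step_eq ll final item

-- ===== VERDICT (by name: the statement is the Claim_ definition above) =====
theorem give_closed_spec : Claim_equal_give_closed := by
  intro list_list _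
  unfold Spec_give_closed
  exact give_closed_spec_aux list_list
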